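-- pv_equiv track=rewrite | github.com/anushka21187/network_path_finder | network_matrix.py | network_matrix
-- ===== SOURCE A (Python) =====
-- def network_matrix(number_of_rows, number_of_columns):
--     #matrix = [[0]*number_of_columns]*number_of_rows
--     matrix = []
--
--     node_id = 0
--     for row_index in range (0, number_of_rows):
--         matrix_row = []
--         for col_index in range (0, number_of_columns):
--             matrix_row.append(node_id)
--             node_id = node_id + 1
--         matrix.append(tuple(matrix_row))
--     return tuple(matrix)
-- ===== SOURCE B (Python) =====
-- def network_matrix(number_of_rows, number_of_columns):
--     # flat-then-reshape: one flat id range, sliced into row tuples (no running counter)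
--     width = max(number_of_columns, 0)
--     flat = tuple(range(max(number_of_rows, 0) * width))
--     return tuple(flat[i * width:(i + 1) * width] for i in range(number_of_rows))
-- ===== Notes on version B (the rewrite author's own statement) =====
-- stated objective: alternative
-- what changed: Replaces the per-cell mutable node_id counter and nested append loops with a single flat range of ids reshaped into rows by slicing.
import Mathlib
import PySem

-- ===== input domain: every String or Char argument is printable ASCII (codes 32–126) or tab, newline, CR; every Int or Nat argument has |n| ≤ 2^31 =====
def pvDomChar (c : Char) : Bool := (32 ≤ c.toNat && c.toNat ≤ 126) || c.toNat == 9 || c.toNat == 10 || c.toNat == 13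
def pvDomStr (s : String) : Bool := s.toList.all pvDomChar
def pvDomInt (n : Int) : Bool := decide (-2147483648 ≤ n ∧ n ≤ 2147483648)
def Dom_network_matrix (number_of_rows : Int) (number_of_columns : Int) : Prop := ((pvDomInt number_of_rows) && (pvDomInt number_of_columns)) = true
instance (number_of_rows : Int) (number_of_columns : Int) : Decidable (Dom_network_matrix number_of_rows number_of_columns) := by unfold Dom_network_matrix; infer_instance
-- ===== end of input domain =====

-- B replaces A's per-cell node_id counter with a flat id range reshaped into rows by slicing (alternative decomposition, same cost).


-- ===== PORT A =====
-- A: nested loops with a running node_id counter, appending cell by cell.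
def network_matrix (number_of_rows : Int) (number_of_columns : Int) : List (List Int) :=
  (((PySem.List.pyRange 0 number_of_rows 1).foldl
      (fun (st : List (List Int) × Int) _ =>
        let inner := (PySem.List.pyRange 0 number_of_columns 1).foldl
          (fun (st2 : List Int × Int) _ => (st2.1 ++ [st2.2], st2.2 + 1)) ([], st.2)
        (st.1 ++ [inner.1], inner.2))
      ([], 0))).1

-- ===== PORT B =====
-- B: one flat id range, reshaped into rows by slicing.
def network_matrix_alt (number_of_rows : Int) (number_of_columns : Int) : List (List Int) :=
  let width : Int := max number_of_columns 0
  let flat : List Int := PySem.List.pyRange 0 (max number_of_rows 0 * width) 1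
  (PySem.List.pyRange 0 number_of_rows 1).map
    (fun i => PySem.List.slice flat (some (i * width)) (some ((i + 1) * width)))

-- ===== PRECONDITION & SPEC =====
def Spec_network_matrix (number_of_rows : Int) (number_of_columns : Int) (out : List (List Int)) : Prop := out = network_matrix_alt number_of_rows number_of_columns
instance (number_of_rows : Int) (number_of_columns : Int) (out : List (List Int)) : Decidable (Spec_network_matrix number_of_rows number_of_columns out) := by unfold Spec_network_matrix; infer_instance

-- ===== CLAIM (what is proved, stated in full; the proofs are below) =====
def Claim_equal_network_matrix : Prop := ∀ (number_of_rows : Int) (number_of_columns : Int), Dom_network_matrix number_of_rows number_of_columns → Spec_network_matrix number_of_rows number_of_columns (network_matrix number_of_rows number_of_columns)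

-- ===== LEMMAS AND PROOFS =====
theorem innerA (l : List Int) (acc : List Int) (n : Int) :
    l.foldl (fun (st2 : List Int × Int) _ => (st2.1 ++ [st2.2], st2.2 + 1)) (acc, n)
    = (acc ++ PySem.List.pyRange n (n + l.length) 1, n + l.length) := by
  induction l generalizing acc n with
  | nil => simp [PySem.List.pyRange_one_eq_nil]
  | cons x xs ih =>
    rw [List.foldl_cons, ih, List.length_cons]
    have hb : n + ((xs.length + 1 : Nat) : Int) = (n + 1) + (xs.length : Int) := by
      push_cast; ring
    rw [hb, PySem.List.pyRange_one_cons (show n < n + 1 + (xs.length : Int) by omega)]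
    simp

theorem stepA_eq (c : Int) :
    (fun (st : List (List Int) × Int) (_ : Int) =>
        let inner := (PySem.List.pyRange 0 c 1).foldl
          (fun (st2 : List Int × Int) _ => (st2.1 ++ [st2.2], st2.2 + 1)) ([], st.2)
        (st.1 ++ [inner.1], inner.2))
    = fun st _ => (st.1 ++ [PySem.List.pyRange st.2 (st.2 + max c 0) 1], st.2 + max c 0) := by
  funext (st : List (List Int) × Int) (_ : Int)
  have hl : ((PySem.List.pyRange 0 c 1).length : Int) = max c 0 := by
    rw [PySem.List.length_pyRange_one]; omega
  simp only [innerA, List.nil_append, hl]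

theorem sliceRange (N a b : Int) (h0 : 0 ≤ a) (hab : a ≤ b) (hbN : b ≤ N) :
    PySem.List.slice (PySem.List.pyRange 0 N 1) (some a) (some b)
    = PySem.List.pyRange a b 1 := by
  rw [PySem.List.slice_toNat _ h0 (by omega)]
  rw [PySem.List.pyRange_one_append 0 a N h0 (by omega)]
  have hla : (PySem.List.pyRange 0 a 1).length = a.toNat := by
    rw [PySem.List.length_pyRange_one]; omega
  rw [List.drop_left' hla]
  rw [PySem.List.pyRange_one_append a b N hab hbN]
  have hlb : (PySem.List.pyRange a b 1).length = b.toNat - a.toNat := by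
    rw [PySem.List.length_pyRange_one]; omega
  rw [List.take_left' hlb]

theorem outerA (c : Int) (k : Nat) :
    ((PySem.List.pyRange 0 (k : Int) 1).foldl
      (fun (st : List (List Int) × Int) _ =>
        (st.1 ++ [PySem.List.pyRange st.2 (st.2 + max c 0) 1], st.2 + max c 0)) ([], 0))
    = ((PySem.List.pyRange 0 (k : Int) 1).map
        (fun i => PySem.List.pyRange (i * max c 0) (i * max c 0 + max c 0) 1),
       (k : Int) * max c 0) := by
  induction k with
  | zero => simp [PySem.List.pyRange_one_eq_nil]
  | succ m ih =>
    have hcast : ((m + 1 : Nat) : Int) = (m : Int) + 1 := by push_cast; ring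
    rw [hcast, PySem.List.pyRange_one_succ_right (show (0:Int) ≤ (m:Int) by omega)]
    rw [List.foldl_append, List.map_append, ih]
    simp only [List.foldl_cons, List.foldl_nil, List.map_cons, List.map_nil, Prod.mk.injEq]
    constructor
    · trivial
    · ring

theorem network_matrix_eq_alt (r c : Int) : network_matrix r c = network_matrix_alt r c := by
  unfold network_matrix network_matrix_alt
  rw [stepA_eq]
  by_cases hr : r ≤ 0
  · rw [PySem.List.pyRange_one_eq_nil (by omega)]
    simp
  · have hrk : r = (r.toNat : Int) := by omega
    rw [hrk, outerA]
    refine List.map_congr_left (fun i hi => ?_)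
    have hi' := (PySem.List.mem_pyRange_one).1 hi
    have hw : (0:Int) ≤ max c 0 := le_max_right _ _
    rw [sliceRange]
    · congr 1; ring
    · exact mul_nonneg hi'.1 hw
    · nlinarith [hi'.1]
    · have hm : max ((r.toNat : Int)) 0 = (r.toNat : Int) := by omega
      rw [hm]
      have h1 : i + 1 ≤ (r.toNat : Int) := by omega
      nlinarith


-- ===== VERDICT (by name: the statement is the Claim_ definition above) =====
theorem network_matrix_spec : Claim_equal_network_matrix := by
  unfold Claim_equal_network_matrix Spec_network_matrix
  intro r c _
  exact network_matrix_eq_alt r c
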